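-- pv_equiv track=rewrite | github.com/keigo-h/CV_Final | code_3/handle_input.py | get_word_cords
-- ===== SOURCE A (Python) =====
-- def get_word_loc(img, start, end, min_height, max_height):
--     left, right, top, bottom = 0,0,0,0
--     if start == end:
--         left = start[0]
--         right = end[0] + end[2]
--         bottom = start[1]
--         top = start[1] + start[3]
--         # cv2.rectangle(img, (start[0], start[1]), (start[0] + start[2], start[1]+ start[3]), (255, 0, 0), 2)
--         # cv2.imshow('Words', img)
--         # cv2.waitKey()
--     else:
--         left = start[0]
--         right = end[0] + end[2]
--         bottom = min_height
--         top = max_height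
--         # cv2.rectangle(img, (start[0], min_height), (end[0] + end[2], max_height), (255, 0, 0), 2)
--         # cv2.imshow('Words', img)
--         # cv2.waitKey()
--     return left, right, top, bottom
--
-- def get_word_cords(img, cors, threshold):
--     i = 0
--     start = cors[0]
--     end = cors[0]
--     max_height = cors[0][1] + cors[0][3]
--     min_height = cors[0][1]
--     word_locs = []
--     while i < len(cors) - 1:
--         x,y,w,h = cors[i]
--         x_p, y_p, w_p, h_p = cors[i+1]
--         if abs(x_p - (x + w)) < threshold:
--             end = cors[i+1]
--             max_height = max(max_height, y_p + h_p)
--             min_height = min(min_height, y_p)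
--             i += 1
--         else:
--             word_locs.append(get_word_loc(img, start, end, min_height, max_height))
--             start = cors[i + 1]
--             end = cors[i + 1]
--             max_height = start[1] + start[3]
--             min_height = start[1]
--             i += 1
--
--     word_locs.append(get_word_loc(img, start, end, min_height, max_height))
--     return word_locs
-- ===== SOURCE B (Python) =====
-- def get_word_loc(img, start, end, min_height, max_height):
--     left = start[0]
--     right = end[0] + end[2]
--     if start == end:
--         top = start[1] + start[3]
--         bottom = start[1]
--     else:
--         top = max_height
--         bottom = min_height
--     return left, right, top, bottom
--
-- def get_word_cords(img, cors, threshold):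
--     # phase 1: partition cors into groups of consecutive character boxes
--     groups = [[cors[0]]]
--     for prev, nxt in zip(cors, cors[1:]):
--         if abs(nxt[0] - (prev[0] + prev[2])) < threshold:
--             groups[-1].append(nxt)
--         else:
--             groups.append([nxt])
--     # phase 2: map each group to its word bounding box
--     word_locs = []
--     for g in groups:
--         word_locs.append(get_word_loc(img, g[0], g[-1],
--                                       min(b[1] for b in g),
--                                       max(b[1] + b[3] for b in g)))
--     return word_locs
-- ===== Notes on version B (the rewrite author's own statement) =====
-- stated objective: alternative
-- what changed: Replaces A's single index-driven while loop that carries running start/end/min/max state with a two-phase decomposition: first partition cors into groups of consecutive boxes, then map each group to its word box via head/last and per-group min/max.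
import Mathlib
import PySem

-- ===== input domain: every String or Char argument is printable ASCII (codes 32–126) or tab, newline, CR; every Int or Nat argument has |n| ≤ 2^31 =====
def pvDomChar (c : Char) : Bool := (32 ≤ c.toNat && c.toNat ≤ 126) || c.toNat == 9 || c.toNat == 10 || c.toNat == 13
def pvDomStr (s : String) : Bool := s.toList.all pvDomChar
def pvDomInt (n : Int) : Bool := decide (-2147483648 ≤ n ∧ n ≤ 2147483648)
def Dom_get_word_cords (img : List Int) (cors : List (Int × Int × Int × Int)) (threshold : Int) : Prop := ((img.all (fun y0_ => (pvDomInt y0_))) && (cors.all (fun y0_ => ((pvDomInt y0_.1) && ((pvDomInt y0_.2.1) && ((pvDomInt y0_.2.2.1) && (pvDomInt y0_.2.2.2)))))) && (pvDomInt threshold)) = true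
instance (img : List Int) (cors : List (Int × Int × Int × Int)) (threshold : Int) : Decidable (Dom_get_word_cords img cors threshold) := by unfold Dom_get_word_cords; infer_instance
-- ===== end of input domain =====

-- B re-decomposes A's single running-state scan into two phases — partition cors into
-- groups, then map each group to its word box — same values, 'alternative' objective.


-- ===== PORT A =====
def get_word_locA (img : List Int) (start end_ : Int × Int × Int × Int) (minh maxh : Int) : Int × Int × Int × Int :=
  if start = end_ then
    (start.1, end_.1 + end_.2.2.1, start.2.1 + start.2.2.2, start.2.1)
  else
    (start.1, end_.1 + end_.2.2.1, maxh, minh)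

-- A's while loop: the list argument is cors[i:], the loop runs while at least two remain
def loopA (img : List Int) (threshold : Int) : List (Int × Int × Int × Int) → (Int × Int × Int × Int) → (Int × Int × Int × Int) → Int → Int → List (Int × Int × Int × Int) → List (Int × Int × Int × Int)
  | c :: n :: rest, start, end_, minh, maxh, acc =>
      if |n.1 - (c.1 + c.2.2.1)| < threshold then
        loopA img threshold (n :: rest) start n (min minh n.2.1) (max maxh (n.2.1 + n.2.2.2)) acc
      else
        loopA img threshold (n :: rest) n n n.2.1 (n.2.1 + n.2.2.2) (acc ++ [get_word_locA img start end_ minh maxh])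
  | _, start, end_, minh, maxh, acc => acc ++ [get_word_locA img start end_ minh maxh]

def get_word_cords (img : List Int) (cors : List (Int × Int × Int × Int)) (threshold : Int) : List (Int × Int × Int × Int) :=
  match cors with
  | [] => []   -- Python raises IndexError here; excluded by Pre_
  | c :: rest => loopA img threshold (c :: rest) c c c.2.1 (c.2.1 + c.2.2.2) []

-- ===== PORT B =====
def word_locB (img : List Int) (start end_ : Int × Int × Int × Int) (minh maxh : Int) : Int × Int × Int × Int :=
  let left := start.1
  let right := end_.1 + end_.2.2.1
  if start = end_ then (left, right, start.2.1 + start.2.2.2, start.2.1)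
  else (left, right, maxh, minh)

-- phase 2 helper: one group -> its word box ([] unreachable: groups are nonempty)
def wordOfGroup (img : List Int) : List (Int × Int × Int × Int) → (Int × Int × Int × Int)
  | [] => (0, 0, 0, 0)
  | b :: bs =>
      word_locB img b ((b :: bs).getLast (by simp))
        (bs.foldl (fun m q => min m q.2.1) b.2.1)
        (bs.foldl (fun m q => max m (q.2.1 + q.2.2.2)) (b.2.1 + b.2.2.2))

def get_word_cords_alt (img : List Int) (cors : List (Int × Int × Int × Int)) (threshold : Int) : List (Int × Int × Int × Int) :=
  match cors with
  | [] => []   -- Python raises IndexError here; excluded by Pre_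
  | c :: rest =>
      -- phase 1: fold over zip(cors, cors[1:]) building (finished groups, current group)
      let st := (List.zip (c :: rest) rest).foldl
        (fun (st : List (List (Int × Int × Int × Int)) × List (Int × Int × Int × Int)) pn =>
          if |pn.2.1 - (pn.1.1 + pn.1.2.2.1)| < threshold then (st.1, st.2 ++ [pn.2])
          else (st.1 ++ [st.2], [pn.2]))
        ([], [c])
      (st.1 ++ [st.2]).map (wordOfGroup img)

-- ===== PRECONDITION & SPEC =====
-- Pre_ excludes only empty cors, on which Python A raises IndexError (cors[0]).
def Pre_get_word_cords (img : List Int) (cors : List (Int × Int × Int × Int)) (threshold : Int) : Prop := cors ≠ []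
instance (img : List Int) (cors : List (Int × Int × Int × Int)) (threshold : Int) : Decidable (Pre_get_word_cords img cors threshold) := by unfold Pre_get_word_cords; infer_instance
def pvWitness_get_word_cords : List Int × (List (Int × Int × Int × Int)) × Int := ([], [(0, 0, 2, 3), (2, 1, 2, 2), (9, 0, 1, 1)], 3)

def Spec_get_word_cords (img : List Int) (cors : List (Int × Int × Int × Int)) (threshold : Int) (out : List (Int × Int × Int × Int)) : Prop := out = get_word_cords_alt img cors threshold
instance (img : List Int) (cors : List (Int × Int × Int × Int)) (threshold : Int) (out : List (Int × Int × Int × Int)) : Decidable (Spec_get_word_cords img cors threshold out) := by unfold Spec_get_word_cords; infer_instance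

-- ===== CLAIM (what is proved, stated in full; the proofs are below) =====
def Claim_equal_get_word_cords : Prop := ∀ (img : List Int) (cors : List (Int × Int × Int × Int)) (threshold : Int), Dom_get_word_cords img cors threshold → Pre_get_word_cords img cors threshold → Spec_get_word_cords img cors threshold (get_word_cords img cors threshold)

-- ===== LEMMAS AND PROOFS =====

-- the two word-box helpers compute the same tuple
theorem word_loc_eq (img : List Int) (s e : Int × Int × Int × Int) (mn mx : Int) :
    get_word_locA img s e mn mx = word_locB img s e mn mx := by
  simp [get_word_locA, word_locB]

-- last element of a nonempty list, state-style
def lastOf (b : Int × Int × Int × Int) : List (Int × Int × Int × Int) → (Int × Int × Int × Int)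
  | [] => b
  | q :: qs => lastOf q qs

theorem lastOf_eq_getLast (b : Int × Int × Int × Int) (bs : List (Int × Int × Int × Int)) :
    lastOf b bs = (b :: bs).getLast (by simp) := by
  induction bs generalizing b with
  | nil => rfl
  | cons q qs ih => simpa [lastOf] using ih q

theorem lastOf_append (b : Int × Int × Int × Int) (bs : List (Int × Int × Int × Int)) (n : Int × Int × Int × Int) :
    lastOf b (bs ++ [n]) = n := by
  induction bs generalizing b with
  | nil => rfl
  | cons q qs ih => simpa [lastOf] using ih q

-- B's fold step
def stepB (threshold : Int) (st : List (List (Int × Int × Int × Int)) × List (Int × Int × Int × Int)) (pn : (Int × Int × Int × Int) × (Int × Int × Int × Int)) : List (List (Int × Int × Int × Int)) × List (Int × Int × Int × Int) :=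
  if |pn.2.1 - (pn.1.1 + pn.1.2.2.1)| < threshold then (st.1, st.2 ++ [pn.2])
  else (st.1 ++ [st.2], [pn.2])

-- main invariant: A's running state (start, end=c, minh, maxh, acc) corresponds to
-- B's fold state (done, cur = b :: bs) with c = last of cur
theorem loop_eq (img : List Int) (threshold : Int) (rest : List (Int × Int × Int × Int)) :
    ∀ (b : Int × Int × Int × Int) (bs : List (Int × Int × Int × Int)) (done : List (List (Int × Int × Int × Int))),
      loopA img threshold (lastOf b bs :: rest) b (lastOf b bs)
          (bs.foldl (fun m q => min m q.2.1) b.2.1)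
          (bs.foldl (fun m q => max m (q.2.1 + q.2.2.2)) (b.2.1 + b.2.2.2))
          (done.map (wordOfGroup img))
        = (((List.zip (lastOf b bs :: rest) rest).foldl (stepB threshold) (done, b :: bs)).1
            ++ [((List.zip (lastOf b bs :: rest) rest).foldl (stepB threshold) (done, b :: bs)).2]).map (wordOfGroup img) := by
  induction rest with
  | nil =>
      intro b bs done
      simp [loopA, List.zip, wordOfGroup, word_loc_eq, lastOf_eq_getLast]
  | cons n rest' ih =>
      intro b bs done
      simp only [List.zip_cons_cons, List.foldl_cons, loopA, stepB]
      split_ifs with h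
      · have h1 : lastOf b (bs ++ [n]) = n := lastOf_append b bs n
        have h2 : bs.foldl (fun m q => min m q.2.1) b.2.1 ⊓ n.2.1
            = (bs ++ [n]).foldl (fun m q => min m q.2.1) b.2.1 := by simp
        have h3 : bs.foldl (fun m q => max m (q.2.1 + q.2.2.2)) (b.2.1 + b.2.2.2) ⊔ (n.2.1 + n.2.2.2)
            = (bs ++ [n]).foldl (fun m q => max m (q.2.1 + q.2.2.2)) (b.2.1 + b.2.2.2) := by simp
        have := ih b (bs ++ [n]) done
        rw [h1] at this
        simpa [← h2, ← h3, List.cons_append] using this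
      · have h1 : lastOf n ([] : List (Int × Int × Int × Int)) = n := rfl
        have := ih n [] (done ++ [b :: bs])
        rw [h1] at this
        simp only [List.foldl_nil] at this
        calc loopA img threshold (n :: rest') n n n.2.1 (n.2.1 + n.2.2.2)
              (done.map (wordOfGroup img) ++ [get_word_locA img b (lastOf b bs)
                (bs.foldl (fun m q => min m q.2.1) b.2.1)
                (bs.foldl (fun m q => max m (q.2.1 + q.2.2.2)) (b.2.1 + b.2.2.2))])
            = loopA img threshold (n :: rest') n n n.2.1 (n.2.1 + n.2.2.2)
              ((done ++ [b :: bs]).map (wordOfGroup img)) := by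
              simp [wordOfGroup, word_loc_eq, lastOf_eq_getLast]
          _ = _ := this

-- ===== VERDICT (by name: the statement is the Claim_ definition above) =====
theorem get_word_cords_spec : Claim_equal_get_word_cords := by
  intro img cors threshold _ hpre
  unfold Spec_get_word_cords
  match cors with
  | [] => exact absurd rfl hpre
  | c :: rest =>
      have := loop_eq img threshold rest c [] []
      simpa [get_word_cords, get_word_cords_alt, lastOf, stepB] using this
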